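-- pv_equiv track=rewrite | github.com/TApplencourt/OvO | ompval/utils.py | not_balenced
-- ===== SOURCE A (Python) =====
-- def not_balenced(path):
--     # Merge everything
--     l = []
--     for pragma in path:
--         l.extend(pragma.split())
--
--     # Refractor to count
--
--     #No check is teanm is followed by distribute
--     # And parrallel  by for
--     while l:
--         pragma = l.pop(0)
--         if pragma == 'teams':
--             if not l:
--                 return True
--             else:
--                 pragma = l.pop(0)
--                 if pragma != 'distribute':
--                     return True
--         elif pragma == 'parallel':
--             if not l:
--                 return True
--             else:
--                 pragma = l.pop(0)
--                 if pragma != 'for':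
--                     return True
--     return False
-- ===== SOURCE B (Python) =====
-- def not_balenced(path):
--     tokens = []
--     for pragma in path:
--         tokens.extend(pragma.split())
--     expected = None
--     for tok in tokens:
--         if expected is not None:
--             if tok != expected:
--                 return True
--             expected = None
--         elif tok == 'teams':
--             expected = 'distribute'
--         elif tok == 'parallel':
--             expected = 'for'
--     return expected is not None
-- ===== Notes on version B (the rewrite author's own statement) =====
-- stated objective: faster
-- what changed: Replaces the destructive pop(0)-with-lookahead consumption of token pairs by a single forward pass carrying one 'expected next token' state variable.
import Mathlib
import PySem

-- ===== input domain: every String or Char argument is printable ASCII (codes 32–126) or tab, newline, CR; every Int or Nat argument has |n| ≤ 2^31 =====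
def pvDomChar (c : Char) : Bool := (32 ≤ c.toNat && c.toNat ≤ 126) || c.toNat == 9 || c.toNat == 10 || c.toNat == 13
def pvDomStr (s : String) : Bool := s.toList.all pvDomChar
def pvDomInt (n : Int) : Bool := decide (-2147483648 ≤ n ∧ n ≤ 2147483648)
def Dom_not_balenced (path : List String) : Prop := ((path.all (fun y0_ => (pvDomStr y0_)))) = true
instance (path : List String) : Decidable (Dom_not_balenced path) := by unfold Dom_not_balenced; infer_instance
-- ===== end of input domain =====

-- B replaces A's pop(0)-and-lookahead pair consumption by a single pass carrying an
-- 'expected next token' state; same return value, alternative decomposition.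
-- ===== PORT A =====
def pvLoopA : List String → Bool
  | [] => false
  | pragma :: l =>
    if pragma == "teams" then
      match l with
      | [] => true
      | pragma' :: l' => if pragma' != "distribute" then true else pvLoopA l'
    else if pragma == "parallel" then
      match l with
      | [] => true
      | pragma' :: l' => if pragma' != "for" then true else pvLoopA l'
    else pvLoopA l

def not_balenced (path : List String) : Bool :=
  pvLoopA (path.foldl (fun l pragma => l ++ PySem.Str.split₀ pragma) [])

-- ===== PORT B =====
def pvLoopB : Option String → List String → Bool
  | expected, [] => expected.isSome
  | some e, tok :: rest => if tok != e then true else pvLoopB none rest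
  | none, tok :: rest =>
    if tok == "teams" then pvLoopB (some "distribute") rest
    else if tok == "parallel" then pvLoopB (some "for") rest
    else pvLoopB none rest

def not_balenced_alt (path : List String) : Bool :=
  pvLoopB none (path.foldl (fun l pragma => l ++ PySem.Str.split₀ pragma) [])

-- ===== PRECONDITION & SPEC =====
def Spec_not_balenced (path : List String) (out : Bool) : Prop := out = not_balenced_alt path
instance (path : List String) (out : Bool) : Decidable (Spec_not_balenced path out) := by unfold Spec_not_balenced; infer_instance

-- ===== CLAIM (what is proved, stated in full; the proofs are below) =====
def Claim_equal_not_balenced : Prop := ∀ (path : List String), Dom_not_balenced path → Spec_not_balenced path (not_balenced path)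

-- ===== LEMMAS AND PROOFS =====

-- ===== VERDICT (by name: the statement is the Claim_ definition above) =====
theorem pvLoop_eq : ∀ (l : List String), pvLoopA l = pvLoopB none l := by
  intro l
  fun_induction pvLoopA l <;> simp_all [pvLoopB]

theorem not_balenced_spec : Claim_equal_not_balenced := by
  intro path _
  unfold Spec_not_balenced not_balenced not_balenced_alt
  exact pvLoop_eq _
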